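-- pv_equiv track=rewrite | github.com/nvda-ci/aiperf | tools/generate_plugin_overloads.py | generate_imports
-- ===== SOURCE A (Python) =====
-- from collections import defaultdict
--
-- def parse_class_path(class_path: str) -> tuple[str, str]:
--     """Parse 'module.path:ClassName' into (module_path, class_name)."""
--     if ":" not in class_path:
--         raise ValueError(
--             f"Invalid class path format: {class_path} (expected 'module:Class')"
--         )
--     module_path, class_name = class_path.split(":", 1)
--     return module_path, class_name
--
-- def generate_imports(categories: dict) -> str:
--     """Generate import statements grouped by module."""
--     # Group protocols by their import module
--     imports_by_module: dict[str, list[str]] = defaultdict(list)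
--
--     for category_data in categories.values():
--         protocol_path = category_data.get("protocol", "")
--         if not protocol_path:
--             continue
--
--         module_path, class_name = parse_class_path(protocol_path)
--         imports_by_module[module_path].append(class_name)
--
--     # Sort and deduplicate
--     for module in imports_by_module:
--         imports_by_module[module] = sorted(set(imports_by_module[module]))
--
--     # Generate import lines
--     lines = []
--
--     # Standard library imports
--     lines.append("from pathlib import Path")
--     lines.append("from typing import Any, Final, Literal, TypedDict, overload")
--     lines.append("")
--
--     # Protocol imports grouped by module, sorted
--     for module_path in sorted(imports_by_module.keys()):
--         class_names = imports_by_module[module_path]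
--         if len(class_names) == 1:
--             lines.append(f"from {module_path} import {class_names[0]}")
--         else:
--             lines.append(f"from {module_path} import (")
--             for name in class_names:
--                 lines.append(f"    {name},")
--             lines.append(")")
--
--     # Always import PluginCategory from enums
--     lines.append("from aiperf.plugin.enums import PluginCategory")
--
--     return "\n".join(lines)
-- ===== SOURCE B (Python) =====
-- from itertools import groupby
--
-- def generate_imports(categories: dict) -> str:
--     """Generate import statements grouped by module (flat pair list + groupby)."""
--     pairs = []
--     for category_data in categories.values():
--         protocol_path = category_data.get("protocol", "")
--         if not protocol_path:
--             continue
--         if ":" not in protocol_path: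
--             raise ValueError(
--                 f"Invalid class path format: {protocol_path} (expected 'module:Class')"
--             )
--         module_path, class_name = protocol_path.split(":", 1)
--         pairs.append((module_path, class_name))
--
--     out = [
--         "from pathlib import Path",
--         "from typing import Any, Final, Literal, TypedDict, overload",
--         "",
--     ]
--     for module_path, grp in groupby(sorted(set(pairs)), key=lambda t: t[0]):
--         names = [c for _, c in grp]
--         if len(names) == 1:
--             out.append(f"from {module_path} import {names[0]}")
--         else:
--             out.append(f"from {module_path} import (")
--             out.extend(f"    {c}," for c in names)
--             out.append(")")
--     out.append("from aiperf.plugin.enums import PluginCategory")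
--     return "\n".join(out)
-- ===== Notes on version B (the rewrite author's own statement) =====
-- stated objective: alternative
-- what changed: Replaces A's defaultdict grouping plus an in-place per-key sort/dedup pass and a sorted-keys emission loop by collecting flat (module, class) pairs, computing sorted(set(pairs)) once, and emitting groups with itertools.groupby.
import Mathlib
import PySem

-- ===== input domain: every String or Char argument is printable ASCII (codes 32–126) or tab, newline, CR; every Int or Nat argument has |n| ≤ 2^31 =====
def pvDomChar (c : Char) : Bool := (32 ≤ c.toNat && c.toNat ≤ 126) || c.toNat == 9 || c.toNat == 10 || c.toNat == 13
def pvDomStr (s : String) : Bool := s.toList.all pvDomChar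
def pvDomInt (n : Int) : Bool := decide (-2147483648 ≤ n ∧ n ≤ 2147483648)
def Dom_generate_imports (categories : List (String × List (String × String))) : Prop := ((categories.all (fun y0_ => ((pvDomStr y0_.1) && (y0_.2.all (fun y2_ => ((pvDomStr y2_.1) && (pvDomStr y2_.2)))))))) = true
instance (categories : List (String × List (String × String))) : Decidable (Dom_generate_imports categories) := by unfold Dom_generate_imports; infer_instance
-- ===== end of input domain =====

-- B replaces A's defaultdict grouping + per-key sort/dedup + sorted-keys emission by one
-- sorted(set(pairs)) pass consumed with groupby (objective: alternative decomposition).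

-- ===== PORT A =====
-- port of parse_class_path: the ValueError (no ':' in the path) ports as none
-- (split(":", 1) then yields a single part, so the two-name unpacking pattern fails)
def parse_class_path (class_path : String) : Option (String × String) :=
  match PySem.Str.splitMax? class_path ":" 1 with
  | some (m :: c :: _) => some (m, c)
  | _ => none

def generate_imports (categories : List (String × List (String × String))) : String :=
  let cats : PySem.Dict String (PySem.Dict String String) :=
    PySem.Dict.ofList (categories.map (fun q => (q.1, PySem.Dict.ofList q.2)))
  let ibm : PySem.Dict String (List String) :=
    cats.values.foldl (fun ibm cd =>
      let protocol_path := cd.getD "protocol" ""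
      if protocol_path = "" then ibm
      else
        match parse_class_path protocol_path with
        | some (m, c) => ibm.modify m [] (fun l => l ++ [c])
        | none => ibm) PySem.Dict.empty
  let ibm2 : PySem.Dict String (List String) :=
    ibm.keys.foldl (fun d k =>
      d.insert k (PySem.List.sorted (PySem.Set.ofList (d.getD k [])) (fun x => x))) ibm
  let lines : List String :=
    ["from pathlib import Path", "from typing import Any, Final, Literal, TypedDict, overload", ""]
  let lines :=
    (PySem.List.sorted ibm2.keys (fun x => x)).foldl (fun ls m =>
      let class_names := ibm2.getD m []
      if class_names.length = 1 then
        ls ++ ["from " ++ m ++ " import " ++ PySem.List.pyGetD class_names (0 : Int) ""]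
      else
        (class_names.foldl (fun ls2 n => ls2 ++ ["    " ++ n ++ ","])
          (ls ++ ["from " ++ m ++ " import ("])) ++ [")"]) lines
  let lines := lines ++ ["from aiperf.plugin.enums import PluginCategory"]
  PySem.Str.join "\n" lines

-- ===== PORT B =====
-- port of itertools.groupby over the sorted unique pair list: each group is the
-- maximal run of consecutive pairs sharing the module (takeWhile / dropWhile)
def emitGroups : List (String × String) → List String
  | [] => []
  | (m, c) :: rest =>
      let grp := rest.takeWhile (fun q => q.1 == m)
      let names := c :: grp.map (fun q => q.2)
      (if names.length = 1 then ["from " ++ m ++ " import " ++ c]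
       else ("from " ++ m ++ " import (") :: (names.map (fun n => "    " ++ n ++ ",") ++ [")"]))
      ++ emitGroups (rest.dropWhile (fun q => q.1 == m))
termination_by l => l.length
decreasing_by
  simpa using Nat.lt_succ_of_le (List.length_dropWhile_le _ _)

def generate_imports_alt (categories : List (String × List (String × String))) : String :=
  let cats : PySem.Dict String (PySem.Dict String String) :=
    PySem.Dict.ofList (categories.map (fun q => (q.1, PySem.Dict.ofList q.2)))
  let pairs : List (String × String) :=
    cats.values.foldl (fun acc cd =>
      let protocol_path := cd.getD "protocol" ""
      if protocol_path = "" then acc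
      else
        -- the ValueError (no ':') ports as none / a one-part split: skip (excluded by Pre_)
        match PySem.Str.splitMax? protocol_path ":" 1 with
        | some (m :: c :: _) => acc ++ [(m, c)]
        | _ => acc) []
  let srt := PySem.List.sorted (PySem.Set.ofList pairs) (fun q => toLex q)
  PySem.Str.join "\n"
    ((["from pathlib import Path", "from typing import Any, Final, Literal, TypedDict, overload", ""]
      ++ emitGroups srt) ++ ["from aiperf.plugin.enums import PluginCategory"])

-- ===== PRECONDITION & SPEC =====
-- Pre_ excludes exactly the inputs on which A raises ValueError: a category whose
-- effective (post dict-collapse) non-empty "protocol" value contains no ':'.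
def Pre_generate_imports (categories : List (String × List (String × String))) : Prop :=
  ((PySem.Dict.ofList (categories.map (fun q => (q.1, PySem.Dict.ofList q.2)))).values.all
    (fun cd =>
      let p := cd.getD "protocol" ""
      p == "" || PySem.Str.isIn ":" p)) = true
instance (categories : List (String × List (String × String))) : Decidable (Pre_generate_imports categories) := by unfold Pre_generate_imports; infer_instance

def pvWitness_generate_imports : (List (String × List (String × String))) :=
  [("timing", [("protocol", "aiperf.timing:TimingManagerProtocol")]),
   ("export", [("protocol", "aiperf.exporters:ExporterProtocol"), ("doc", "x")]),
   ("empty", [])]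

def Spec_generate_imports (categories : List (String × List (String × String))) (out : String) : Prop := out = generate_imports_alt categories
instance (categories : List (String × List (String × String))) (out : String) : Decidable (Spec_generate_imports categories out) := by unfold Spec_generate_imports; infer_instance

-- ===== CLAIM (what is proved, stated in full; the proofs are below) =====
def Claim_equal_generate_imports : Prop := ∀ (categories : List (String × List (String × String))), Dom_generate_imports categories → Pre_generate_imports categories → Spec_generate_imports categories (generate_imports categories)

-- ===== LEMMAS AND PROOFS =====

-- the (module, class) pair a category's inner dict contributes, if any
def pvExt (cd : PySem.Dict String String) : Option (String × String) :=
  if cd.getD "protocol" "" = "" then none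
  else
    match PySem.Str.splitMax? (cd.getD "protocol" "") ":" 1 with
    | some (m :: c :: _) => some (m, c)
    | _ => none

def pvP (categories : List (String × List (String × String))) : List (String × String) :=
  (PySem.Dict.ofList (categories.map (fun q => (q.1, PySem.Dict.ofList q.2)))).values.filterMap pvExt

def pvNames (P : List (String × String)) (m : String) : List String :=
  PySem.List.sorted (PySem.Set.ofList ((P.filter (fun q => q.1 == m)).map (fun q => q.2))) (fun x => x)

def pvMods (P : List (String × String)) : List String :=
  PySem.List.sorted (PySem.Set.ofList (P.map (fun q => q.1))) (fun x => x)

def pvBlock (m : String) (ns : List String) : List String :=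
  if ns.length = 1 then ["from " ++ m ++ " import " ++ ns.headI]
  else ("from " ++ m ++ " import (") :: (ns.map (fun n => "    " ++ n ++ ",") ++ [")"])

def pvHeader : List String :=
  ["from pathlib import Path", "from typing import Any, Final, Literal, TypedDict, overload", ""]

def pvFooter : String := "from aiperf.plugin.enums import PluginCategory"

lemma lemA_fold (vs : List (PySem.Dict String String)) (d : PySem.Dict String (List String)) :
    vs.foldl (fun ibm cd =>
      if cd.getD "protocol" "" = "" then ibm
      else
        match parse_class_path (cd.getD "protocol" "") with
        | some (m, c) => ibm.modify m [] (fun l => l ++ [c])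
        | none => ibm) d
    = (vs.filterMap pvExt).foldl (fun d q => d.modify q.1 [] (fun l => l ++ [q.2])) d := by
  induction vs generalizing d with
  | nil => rfl
  | cons cd vs ih =>
      simp only [List.foldl_cons, List.filterMap_cons]
      by_cases hp : cd.getD "protocol" "" = ""
      · have he : pvExt cd = none := by simp [pvExt, hp]
        simp [hp, he, ih]
      · rcases h : PySem.Str.splitMax? (cd.getD "protocol" "") ":" 1 with _ | (_ | ⟨m, _ | ⟨c, rest⟩⟩) <;>
          [skip; skip; skip;
            (have he : pvExt cd = some (m, c) := by simp [pvExt, hp, h])] <;>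
          [(have he : pvExt cd = none := by simp [pvExt, hp, h]); (have he : pvExt cd = none := by simp [pvExt, hp, h]);
            (have he : pvExt cd = none := by simp [pvExt, hp, h]); skip] <;>
          [(have hpc : parse_class_path (cd.getD "protocol" "") = none := by simp [parse_class_path, h]);
            (have hpc : parse_class_path (cd.getD "protocol" "") = none := by simp [parse_class_path, h]);
            (have hpc : parse_class_path (cd.getD "protocol" "") = none := by simp [parse_class_path, h]);
            (have hpc : parse_class_path (cd.getD "protocol" "") = some (m, c) := by simp [parse_class_path, h])] <;>
          simp [hp, hpc, he, ih]

lemma lemB_fold (vs : List (PySem.Dict String String)) (acc : List (String × String)) :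
    vs.foldl (fun acc cd =>
      if cd.getD "protocol" "" = "" then acc
      else
        match PySem.Str.splitMax? (cd.getD "protocol" "") ":" 1 with
        | some (m :: c :: _) => acc ++ [(m, c)]
        | _ => acc) acc
    = acc ++ vs.filterMap pvExt := by
  induction vs generalizing acc with
  | nil => simp
  | cons cd vs ih =>
      simp only [List.foldl_cons, List.filterMap_cons]
      by_cases hp : cd.getD "protocol" "" = ""
      · have he : pvExt cd = none := by simp [pvExt, hp]
        simp [hp, he, ih]
      · rcases h : PySem.Str.splitMax? (cd.getD "protocol" "") ":" 1 with _ | (_ | ⟨m, _ | ⟨c, rest⟩⟩) <;>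
          [skip; skip; skip;
            (have he : pvExt cd = some (m, c) := by simp [pvExt, hp, h])] <;>
          [(have he : pvExt cd = none := by simp [pvExt, hp, h]); (have he : pvExt cd = none := by simp [pvExt, hp, h]);
            (have he : pvExt cd = none := by simp [pvExt, hp, h]); skip] <;>
          simp [hp, h, he, ih]

lemma getD_group (P : List (String × String)) (m : String) :
    (P.foldl (fun d q => d.modify q.1 [] (fun l => l ++ [q.2])) PySem.Dict.empty).getD m []
      = (P.filter (fun q => q.1 == m)).map (fun q => q.2) := by
  simpa using PySem.Dict.getD_foldl_modify_append P PySem.Dict.empty m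

lemma keys_group (P : List (String × String)) :
    (P.foldl (fun d q => d.modify q.1 [] (fun l => l ++ [q.2])) PySem.Dict.empty).keys
      = PySem.Set.ofList (P.map (fun q => q.1)) := by
  have := PySem.Dict.keys_foldl_modify_key P (fun q => q.1) ([] : List String)
    (fun d q l => l ++ [q.2]) PySem.Dict.empty
  simpa [PySem.Dict.keys_empty, PySem.Set.update_empty] using this

lemma pvInsFold_getD (g : List String → List String) (l : List String)
    (d : PySem.Dict String (List String)) (hl : l.Nodup) (k : String) :
    ((l.foldl (fun d k => d.insert k (g (d.getD k []))) d).getD k [])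
      = if k ∈ l then g (d.getD k []) else d.getD k [] := by
  induction l generalizing d with
  | nil => simp
  | cons k0 t ih =>
      rw [List.nodup_cons] at hl
      rcases hl with ⟨hk0, ht⟩
      simp only [List.foldl_cons]
      rw [ih _ ht]
      by_cases hkt : k ∈ t
      · have hne : k ≠ k0 := fun h => hk0 (h ▸ hkt)
        simp [hkt, hne, PySem.Dict.getD_insert, List.mem_cons]
      · by_cases hkk : k = k0
        · subst hkk
          simp [hkt]
        · simp [hkt, hkk, PySem.Dict.getD_insert, List.mem_cons]

lemma pvInsFold_keys (g : List String → List String) (l : List String)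
    (d : PySem.Dict String (List String)) (h : ∀ k ∈ l, k ∈ d.keys) :
    (l.foldl (fun d k => d.insert k (g (d.getD k []))) d).keys = d.keys := by
  rw [PySem.Dict.keys_foldl_insert l (fun d k => g (d.getD k [])) d,
    PySem.Set.update_eq_append_filter]
  have hnil : (PySem.Set.ofList l).filter (fun y => !PySem.Set.contains d.keys y) = [] := by
    rw [List.filter_eq_nil_iff]
    intro a ha
    have hm : a ∈ d.keys := h a ((PySem.Set.mem_ofList l a).1 ha)
    simpa using hm
  rw [hnil, List.append_nil]

lemma mem_names_iff (P : List (String × String)) (m c : String) :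
    c ∈ pvNames P m ↔ (m, c) ∈ P := by
  simp only [pvNames, PySem.List.mem_sorted, PySem.Set.mem_ofList, List.mem_map,
    List.mem_filter, beq_iff_eq]
  constructor
  · rintro ⟨⟨m', c'⟩, ⟨hq, hq1⟩, hq2⟩
    cases hq1; cases hq2; exact hq
  · intro h
    exact ⟨(m, c), ⟨h, rfl⟩, rfl⟩

lemma mem_mods_iff (P : List (String × String)) (m : String) :
    m ∈ pvMods P ↔ ∃ c, (m, c) ∈ P := by
  simp only [pvMods, PySem.List.mem_sorted, PySem.Set.mem_ofList, List.mem_map]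
  constructor
  · rintro ⟨⟨m', c'⟩, hq, hq1⟩
    cases hq1; exact ⟨c', hq⟩
  · rintro ⟨c, hc⟩
    exact ⟨(m, c), hc, rfl⟩

lemma names_pairwise (P : List (String × String)) (m : String) :
    (pvNames P m).Pairwise (· < ·) :=
  PySem.List.sorted_ofList_pairwise_lt _

lemma mods_pairwise (P : List (String × String)) :
    (pvMods P).Pairwise (· < ·) :=
  PySem.List.sorted_ofList_pairwise_lt _

lemma names_ne_nil (P : List (String × String)) (m : String) (h : m ∈ pvMods P) :
    pvNames P m ≠ [] := by
  rcases (mem_mods_iff P m).1 h with ⟨c, hc⟩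
  intro hnil
  exact absurd ((mem_names_iff P m c).2 hc) (by simp [hnil])

lemma srt_eq (P : List (String × String)) :
    PySem.List.sorted (PySem.Set.ofList P) (fun q => toLex q)
      = (pvMods P).flatMap (fun m => (pvNames P m).map (fun c => (m, c))) := by
  have hpw : ((pvMods P).flatMap (fun m => (pvNames P m).map (fun c => (m, c)))).Pairwise
      (fun a b => toLex a < toLex b) := by
    rw [List.pairwise_flatMap]
    constructor
    · intro m hm
      rw [List.pairwise_map]
      exact (names_pairwise P m).imp (fun h => by
        rw [Prod.Lex.lt_iff]; right; exact ⟨rfl, h⟩)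
    · refine (mods_pairwise P).imp ?_
      intro a b hab x hx y hy
      rcases List.mem_map.1 hx with ⟨c, _, rfl⟩
      rcases List.mem_map.1 hy with ⟨c', _, rfl⟩
      rw [Prod.Lex.lt_iff]; left; exact hab
  have hnd : ((pvMods P).flatMap (fun m => (pvNames P m).map (fun c => (m, c)))).Nodup := by
    refine hpw.imp ?_
    intro a b h hab
    subst hab
    exact lt_irrefl _ h
  apply PySem.List.sorted_eq_of_perm_of_pairwise_lt
  · rw [List.perm_ext_iff_of_nodup hnd (PySem.Set.nodup_ofList P)]
    intro q
    rw [PySem.Set.mem_ofList, List.mem_flatMap]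
    constructor
    · rintro ⟨m, hm, hq⟩
      rcases List.mem_map.1 hq with ⟨c, hc, rfl⟩
      exact (mem_names_iff P m c).1 hc
    · intro hq
      exact ⟨q.1, (mem_mods_iff P q.1).2 ⟨q.2, hq⟩,
        List.mem_map.2 ⟨q.2, (mem_names_iff P q.1 q.2).2 hq, rfl⟩⟩
  · exact hpw

lemma tw_append {α : Type} (p : α → Bool) (xs ys : List α) (h : ∀ x ∈ xs, p x = true) :
    (xs ++ ys).takeWhile p = xs ++ ys.takeWhile p := by
  induction xs with
  | nil => simp
  | cons x xs ih =>
      simp only [List.cons_append, List.takeWhile_cons, h x (by simp)]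
      simp [ih (fun x hx => h x (by simp [hx]))]

lemma dw_append {α : Type} (p : α → Bool) (xs ys : List α) (h : ∀ x ∈ xs, p x = true) :
    (xs ++ ys).dropWhile p = ys.dropWhile p := by
  induction xs with
  | nil => simp
  | cons x xs ih =>
      simp only [List.cons_append, List.dropWhile_cons, h x (by simp)]
      exact ih (fun x hx => h x (by simp [hx]))

lemma tw_nil {α : Type} (p : α → Bool) (ys : List α) (h : ∀ y ∈ ys, p y = false) :
    ys.takeWhile p = [] := by
  cases ys with
  | nil => rfl
  | cons y ys => simp [h y (by simp)]

lemma dw_self {α : Type} (p : α → Bool) (ys : List α) (h : ∀ y ∈ ys, p y = false) :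
    ys.dropWhile p = ys := by
  cases ys with
  | nil => rfl
  | cons y ys => simp [h y (by simp)]

lemma emit_eq (MS : List String) (f : String → List String)
    (hpw : MS.Pairwise (· < ·)) (hne : ∀ m ∈ MS, f m ≠ []) :
    emitGroups (MS.flatMap (fun m => (f m).map (fun c => (m, c))))
      = MS.flatMap (fun m => pvBlock m (f m)) := by
  induction MS with
  | nil =>
      simp only [List.flatMap_nil]
      rw [emitGroups]
  | cons m t ih =>
      rw [List.pairwise_cons] at hpw
      rcases hpw with ⟨hmt, hpt⟩
      rcases hcs : f m with _ | ⟨c, cs⟩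
      · exact absurd hcs (hne m (by simp))
      have hrest : ∀ y ∈ t.flatMap (fun m => (f m).map (fun c => (m, c))),
          ((y : String × String).1 == m) = false := by
        intro y hy
        rcases List.mem_flatMap.1 hy with ⟨m', hm', hy'⟩
        rcases List.mem_map.1 hy' with ⟨c', _, rfl⟩
        have hlt := hmt m' hm'
        simp only [beq_eq_false_iff_ne, ne_eq]
        intro h
        exact absurd (h ▸ hlt) (lt_irrefl m)
      have hcsall : ∀ y ∈ cs.map (fun c => (m, c)), ((y : String × String).1 == m) = true := by
        intro y hy
        rcases List.mem_map.1 hy with ⟨c', _, rfl⟩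
        simp
      simp only [List.flatMap_cons, hcs, List.map_cons, List.cons_append]
      rw [emitGroups]
      rw [tw_append _ _ _ hcsall, tw_nil _ _ hrest,
        dw_append _ _ _ hcsall, dw_self _ _ hrest,
        ih hpt (fun m hm => hne m (by simp [hm]))]
      congr 1
      have hmapsnd : (cs.map (fun c => (m, c))).map (fun q : String × String => q.2) = cs := by
        simp
      rw [List.append_nil, hmapsnd]
      simp only [pvBlock, List.headI]

lemma A_eq (categories : List (String × List (String × String))) :
    generate_imports categories
      = PySem.Str.join "\n" ((pvHeader
          ++ (pvMods (pvP categories)).flatMap (fun m => pvBlock m (pvNames (pvP categories) m)))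
          ++ [pvFooter]) := by
  unfold generate_imports
  simp only []
  rw [lemA_fold]
  rw [show (PySem.Dict.ofList (categories.map (fun q => (q.1, PySem.Dict.ofList q.2)))).values.filterMap pvExt
        = pvP categories from rfl]
  set P := pvP categories with hP
  set G := P.foldl (fun d q => d.modify q.1 [] (fun l => l ++ [q.2])) PySem.Dict.empty with hG
  have hkeys : G.keys = PySem.Set.ofList (P.map (fun q => q.1)) := keys_group P
  have hnd : G.keys.Nodup := by rw [hkeys]; exact PySem.Set.nodup_ofList _
  set ibm2 := G.keys.foldl
      (fun d k => d.insert k (PySem.List.sorted (PySem.Set.ofList (d.getD k [])) (fun x => x))) G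
    with hibm2
  have hk2 : ibm2.keys = G.keys := by
    rw [hibm2]
    exact pvInsFold_keys (fun v => PySem.List.sorted (PySem.Set.ofList v) (fun x => x))
      G.keys G (fun k hk => hk)
  have hmods : PySem.List.sorted ibm2.keys (fun x => x) = pvMods P := by
    rw [hk2, hkeys]; rfl
  have hgd : ∀ m ∈ pvMods P, ibm2.getD m [] = pvNames P m := by
    intro m hm
    have hmk : m ∈ G.keys := by
      rw [hkeys]
      exact (PySem.List.mem_sorted _ _ _ m).1 hm
    rw [hibm2,
      pvInsFold_getD (fun v => PySem.List.sorted (PySem.Set.ofList v) (fun x => x)) G.keys G hnd m,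
      if_pos hmk, getD_group]
    rfl
  rw [hmods]
  rw [PySem.List.foldl_congr_mem (pvMods P) _ (fun ls m => ls ++ pvBlock m (pvNames P m)) _ ?_]
  · rw [PySem.List.foldl_append_eq_flatMap]
    rfl
  · intro acc m hm
    dsimp only
    rw [hgd m hm]
    rcases hn : pvNames P m with _ | ⟨x, _ | ⟨y, t⟩⟩
    · simp [pvBlock]
    · simp [pvBlock, PySem.List.pyGetD, PySem.List.pyGet?, PySem.List.pyIdx?]
    · rw [if_neg (by simp), PySem.List.foldl_append_singleton_eq_map]
      simp [pvBlock]

lemma B_eq (categories : List (String × List (String × String))) :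
    generate_imports_alt categories
      = PySem.Str.join "\n" ((pvHeader
          ++ (pvMods (pvP categories)).flatMap (fun m => pvBlock m (pvNames (pvP categories) m)))
          ++ [pvFooter]) := by
  unfold generate_imports_alt
  simp only []
  rw [lemB_fold, List.nil_append]
  rw [srt_eq, emit_eq _ _ (mods_pairwise _) (fun m hm => names_ne_nil _ m hm)]
  rfl


-- ===== VERDICT (by name: the statement is the Claim_ definition above) =====
theorem generate_imports_spec : Claim_equal_generate_imports := by
  intro categories _ _
  unfold Spec_generate_imports
  rw [A_eq, B_eq]
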